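-- pv_equiv track=rewrite | github.com/Shopify/eng-internship-challenge | python/solution.py | break_encrypted_message_into_digrams
-- ===== SOURCE A (Python) =====
-- def break_encrypted_message_into_digrams(encrypted_message):
--     """
--     Breaks the encrypted message into digrams (pairs of consecutive characters).
--
--     Parameters:
--     - encrypted_message (str): The encrypted message to be broken into digrams.
--
--     Returns:
--     - list of str: A list containing the digrams extracted from the encrypted message.
--     """
--     # Check if the encrypted message has an even number of characters
--     if len(encrypted_message) % 2 != 0:
--         raise ValueError("Encrypted message length must be even")
--
--     # Initialize an empty list to store digrams
--     digrams = []
--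
--     # Iterate through the encrypted message by pairs of characters
--     for i in range(0, len(encrypted_message) - 1, 2):
--         digram = encrypted_message[i:i+2]  # Extract a digram
--         digrams.append(digram)    # Add the digram to the list
--
--     return digrams
-- ===== SOURCE B (Python) =====
-- def break_encrypted_message_into_digrams(encrypted_message):
--     """Pair up consecutive characters by zipping one iterator with itself."""
--     if len(encrypted_message) % 2 != 0:
--         raise ValueError("Encrypted message length must be even")
--     it = iter(encrypted_message)
--     return [a + b for a, b in zip(it, it)]
-- ===== Notes on version B (the rewrite author's own statement) =====
-- stated objective: idiomatic
-- what changed: Replaces the index-driven loop with start indices and slicing by a single pass that zips one character iterator with itself, pairing consecutive characters directly.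
import Mathlib
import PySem

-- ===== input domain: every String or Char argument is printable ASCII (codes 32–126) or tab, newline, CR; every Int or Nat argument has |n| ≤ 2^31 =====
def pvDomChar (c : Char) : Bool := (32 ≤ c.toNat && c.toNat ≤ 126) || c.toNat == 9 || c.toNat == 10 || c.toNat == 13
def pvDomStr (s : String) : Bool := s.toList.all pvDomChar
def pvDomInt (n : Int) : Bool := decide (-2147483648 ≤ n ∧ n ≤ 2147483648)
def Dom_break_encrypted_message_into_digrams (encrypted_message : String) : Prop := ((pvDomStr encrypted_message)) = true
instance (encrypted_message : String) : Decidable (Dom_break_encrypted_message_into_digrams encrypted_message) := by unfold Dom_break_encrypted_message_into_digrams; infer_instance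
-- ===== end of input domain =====

-- B replaces A's index loop with slicing by an iterator zipped with itself (idiomatic pairwise scan); equal return values on even-length input.

-- ===== PORT A =====
-- for i in range(0, len(msg) - 1, 2): digrams.append(msg[i:i+2])
def break_encrypted_message_into_digrams (encrypted_message : String) : List String :=
  (PySem.List.pyRange 0 (PySem.Str.len encrypted_message - 1) 2).foldl
    (fun acc i => acc ++ [PySem.Str.slice encrypted_message (some i) (some (i + 2))]) []

-- ===== PORT B =====
-- zip(it, it) over one iterator of the string: consume two characters per step, one pass
def pvPairUp : List Char → List String
  | a :: b :: rest => String.ofList [a, b] :: pvPairUp rest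
  | _ => []

def break_encrypted_message_into_digrams_alt (encrypted_message : String) : List String :=
  pvPairUp encrypted_message.toList

-- ===== PRECONDITION & SPEC =====
-- Pre_ excludes odd-length strings, on which A raises ValueError (B raises too).
def Pre_break_encrypted_message_into_digrams (encrypted_message : String) : Prop :=
  encrypted_message.toList.length % 2 = 0
instance (encrypted_message : String) : Decidable (Pre_break_encrypted_message_into_digrams encrypted_message) := by unfold Pre_break_encrypted_message_into_digrams; infer_instance

def pvWitness_break_encrypted_message_into_digrams : String := "ABCD"

def Spec_break_encrypted_message_into_digrams (encrypted_message : String) (out : List String) : Prop := out = break_encrypted_message_into_digrams_alt encrypted_message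
instance (encrypted_message : String) (out : List String) : Decidable (Spec_break_encrypted_message_into_digrams encrypted_message out) := by unfold Spec_break_encrypted_message_into_digrams; infer_instance

-- ===== CLAIM (what is proved, stated in full; the proofs are below) =====
def Claim_equal_break_encrypted_message_into_digrams : Prop := ∀ (encrypted_message : String), Dom_break_encrypted_message_into_digrams encrypted_message → Pre_break_encrypted_message_into_digrams encrypted_message → Spec_break_encrypted_message_into_digrams encrypted_message (break_encrypted_message_into_digrams encrypted_message)

-- ===== LEMMAS AND PROOFS =====

-- On an even-length char list, mapping the 2-char slice over the even start indices is pvPairUp.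
lemma pvMap_range_eq_pairUp (cs : List Char) (h : cs.length % 2 = 0) :
    (List.range (cs.length / 2)).map
      (fun k => String.ofList ((cs.drop (2 * k)).take 2)) = pvPairUp cs := by
  induction cs using pvPairUp.induct with
  | case1 a b rest ih =>
      have hr : rest.length % 2 = 0 := by simp [List.length_cons] at h; omega
      have hlen : (a :: b :: rest).length / 2 = rest.length / 2 + 1 := by
        simp [List.length_cons]; omega
      rw [hlen, List.range_succ_eq_map, List.map_cons]
      simp only [Nat.mul_zero, List.drop_zero, List.map_map]
      have : (List.range (rest.length / 2)).map
          ((fun k => String.ofList (((a :: b :: rest).drop (2 * k)).take 2)) ∘ Nat.succ)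
          = (List.range (rest.length / 2)).map (fun k => String.ofList ((rest.drop (2 * k)).take 2)) := by
        apply List.map_congr_left
        intro k _
        simp only [Function.comp]
        congr 1
      rw [this, ih hr]
      simp only [pvPairUp, List.take_succ_cons, List.take_zero]
  | case2 cs hshape =>
      -- cs is not of the form a :: b :: rest; even length, so cs = []
      rcases cs with _ | ⟨a, _ | ⟨b, rest⟩⟩
      · simp [pvPairUp]
      · simp at h
      · exact absurd rfl (hshape a b rest)

-- ===== VERDICT (by name: the statement is the Claim_ definition above) =====
theorem break_encrypted_message_into_digrams_spec : Claim_equal_break_encrypted_message_into_digrams := by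
  intro s _ hpre
  unfold Spec_break_encrypted_message_into_digrams
  unfold break_encrypted_message_into_digrams break_encrypted_message_into_digrams_alt
  set cs := s.toList with hcs
  have hlen : PySem.Str.len s = (cs.length : Int) := by
    simp [PySem.Str.len_eq, hcs]
  rw [hlen, PySem.List.pyRange_of_pos 0 ((cs.length : Int) - 1) (by norm_num)]
  rw [PySem.List.foldl_append_singleton_eq_map, List.nil_append, List.map_map]
  -- number of iterations = cs.length / 2
  have hn : (if (0 : Int) < (cs.length : Int) - 1 then
      (((cs.length : Int) - 1 - 0 + 2 - 1) / 2).toNat else 0) = cs.length / 2 := by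
    split_ifs with hpos
    · omega
    · omega
  rw [hn]
  rw [← pvMap_range_eq_pairUp cs hpre]
  apply List.map_congr_left
  intro k hk
  simp only [List.mem_range] at hk
  simp only [Function.comp, zero_add]
  have hslice : PySem.Str.slice s (some ((2 : Int) * k)) (some ((2 : Int) * k + 2))
      = String.ofList ((cs.drop (2 * k)).take 2) := by
    simp only [PySem.Str.slice, hcs]
    rw [show ∀ (a b : Option Int), PySem.Chars.slice s.toList a b = PySem.List.slice s.toList a b from fun _ _ => rfl]
    rw [PySem.List.slice_toNat _ (by positivity) (by positivity)]
    have e1 : ((2 : Int) * (k : Int)).toNat = 2 * k := by omega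
    have e2 : ((2 : Int) * (k : Int) + 2).toNat - 2 * k = 2 := by omega
    rw [e1, e2]
  rw [hslice]
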